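-- pv_equiv track=rewrite | github.com/Slmbyn/Further-Self-Study | rand_practice_files/Python/practice_probs.py | even_window
-- ===== SOURCE A (Python) =====
-- def even_window(nums):
--     result = []
--     n = len(nums[0])
--     # loop & create 2x2 window
--     for i in range(2):
--         current_window = []
--         # loop thru rows
--         for row in nums:
--             # nested loop thru cols
--             for col in range(i, i+2):
--                 # append each element to current_window
--                 current_window.append(row[col])
--         # check if current_window is all even or not
--         # append true to result if so, else append false
--         result.append((sum(current_window)) % 2 == 0)
--     return result
-- ===== SOURCE B (Python) =====
-- def even_window(nums):
--     c0 = sum(row[0] for row in nums)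
--     c1 = sum(row[1] for row in nums)
--     c2 = sum(row[2] for row in nums)
--     return [(c0 + c1) % 2 == 0, (c1 + c2) % 2 == 0]
-- ===== Notes on version B (the rewrite author's own statement) =====
-- stated objective: simpler
-- what changed: B replaces the two window-building passes (which rebuild and re-scan the shared middle column) with three per-column sums in one conceptual pass and two parity checks of adjacent column-sum pairs.
import Mathlib
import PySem

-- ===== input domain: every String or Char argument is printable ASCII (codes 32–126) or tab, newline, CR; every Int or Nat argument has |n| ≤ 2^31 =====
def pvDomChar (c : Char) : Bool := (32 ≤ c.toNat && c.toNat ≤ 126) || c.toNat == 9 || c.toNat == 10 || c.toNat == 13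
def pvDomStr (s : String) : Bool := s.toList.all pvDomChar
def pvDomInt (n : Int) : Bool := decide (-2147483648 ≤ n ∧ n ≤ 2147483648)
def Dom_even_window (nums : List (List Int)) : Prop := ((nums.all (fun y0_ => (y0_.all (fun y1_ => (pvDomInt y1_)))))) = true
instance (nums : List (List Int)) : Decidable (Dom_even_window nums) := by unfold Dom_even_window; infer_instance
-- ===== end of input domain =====

-- B computes three per-column sums and checks parity of adjacent pairs, instead of
-- building the two 2-column windows explicitly (objective: simpler decomposition).

-- ===== PORT A =====
-- row[col] (raises IndexError out of range; Pre_ excludes that, default 0 unused inside Pre_)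
def pvGetA (row : List Int) (c : Int) : Int := (PySem.List.pyGet? row c).getD 0

def even_window (nums : List (List Int)) : List Bool :=
  -- n = len(nums[0]) : nums[0] raises on empty nums (Pre_ excludes it); n itself is unused
  let _n : Int := ((PySem.List.pyGet? nums 0).getD []).length
  (PySem.List.pyRange 0 2 1).foldl (fun result i =>
    let current_window : List Int :=
      nums.foldl (fun cw row =>
        (PySem.List.pyRange i (i + 2) 1).foldl (fun cw col => cw ++ [pvGetA row col]) cw) []
    result ++ [decide (current_window.sum % 2 = 0)]) []

-- ===== PORT B =====
def even_window_alt (nums : List (List Int)) : List Bool :=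
  let c0 := nums.foldl (fun s row => s + pvGetA row 0) 0
  let c1 := nums.foldl (fun s row => s + pvGetA row 1) 0
  let c2 := nums.foldl (fun s row => s + pvGetA row 2) 0
  [decide ((c0 + c1) % 2 = 0), decide ((c1 + c2) % 2 = 0)]

-- ===== PRECONDITION & SPEC =====
-- Pre_ excludes exactly the inputs on which A raises IndexError: empty nums (nums[0])
-- and any row with fewer than 3 columns (row[2] in the second window).
def Pre_even_window (nums : List (List Int)) : Prop :=
  nums ≠ [] ∧ ∀ row ∈ nums, 3 ≤ row.length
instance (nums : List (List Int)) : Decidable (Pre_even_window nums) := by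
  unfold Pre_even_window; infer_instance

def pvWitness_even_window : List (List Int) := [[1, 2, 3], [4, 5, 6]]

def Spec_even_window (nums : List (List Int)) (out : List Bool) : Prop := out = even_window_alt nums
instance (nums : List (List Int)) (out : List Bool) : Decidable (Spec_even_window nums out) := by unfold Spec_even_window; infer_instance

-- ===== CLAIM (what is proved, stated in full; the proofs are below) =====
def Claim_equal_even_window : Prop := ∀ (nums : List (List Int)), Dom_even_window nums → Pre_even_window nums → Spec_even_window nums (even_window nums)

-- ===== LEMMAS AND PROOFS =====
lemma pyRange_two (i : Int) : PySem.List.pyRange i (i + 2) 1 = [i, i + 1] := by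
  rw [PySem.List.pyRange_one]
  have h2 : (i + 2 - i).toNat = 2 := by omega
  rw [h2]
  simp [List.range_succ]

lemma window_sum (nums : List (List Int)) (i : Int) :
    (nums.foldl (fun cw row =>
      (PySem.List.pyRange i (i + 2) 1).foldl (fun cw col => cw ++ [pvGetA row col]) cw) []).sum
    = (nums.map (fun row => pvGetA row i)).sum + (nums.map (fun row => pvGetA row (i + 1))).sum := by
  have hrow : (fun (cw : List Int) (row : List Int) =>
      (PySem.List.pyRange i (i + 2) 1).foldl (fun cw col => cw ++ [pvGetA row col]) cw)
      = fun cw row => cw ++ [pvGetA row i, pvGetA row (i + 1)] := by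
    funext cw row; rw [pyRange_two]; simp
  rw [hrow, PySem.List.foldl_append_eq_flatMap]
  induction nums with
  | nil => simp
  | cons x xs ih =>
      simp only [List.flatMap_cons, List.map_cons, List.sum_append, List.sum_cons,
        List.sum_nil, List.nil_append] at ih ⊢
      rw [ih]
      ring

-- ===== VERDICT (by name: the statement is the Claim_ definition above) =====
theorem even_window_spec : Claim_equal_even_window := by
  intro nums _ _
  show even_window nums = even_window_alt nums
  simp only [even_window, even_window_alt, PySem.List.foldl_add]
  have h2 : PySem.List.pyRange 0 2 1 = [0, 1] := by decide
  rw [h2]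
  simp only [List.foldl_cons, List.foldl_nil, List.nil_append, window_sum]
  norm_num
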